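-- pv_equiv track=rewrite | github.com/lsc713/TIL | ps/COTE/Programmers/120837개미군단.py | solution
-- ===== SOURCE A (Python) =====
-- def solution(hp):
--     answer = 0
--
--     while(True):
--         if hp==0:
--             return answer
--             break
--         if(hp//5>=0):
--             answer += (hp//5)
--             hp = hp%5
--         if(hp//3>=0):
--             answer += (hp//3)
--             hp = hp%3
--         if hp<=2:
--             if(hp==0):
--                 return answer
--                 break
--             else:
--                 hp -=1
--                 answer+=1
-- ===== SOURCE B (Python) =====
-- def solution(hp):
--     # closed-form greedy: generals (5), soldiers (3), then single ants
--     return hp // 5 + (hp % 5) // 3 + (hp % 5) % 3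
-- ===== Notes on version B (the rewrite author's own statement) =====
-- stated objective: simpler
-- what changed: Replaced A's while-loop, which repeatedly subtracts and decrements leftover hp, by a direct closed-form greedy sum of floor-divisions and remainders.
import Mathlib
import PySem

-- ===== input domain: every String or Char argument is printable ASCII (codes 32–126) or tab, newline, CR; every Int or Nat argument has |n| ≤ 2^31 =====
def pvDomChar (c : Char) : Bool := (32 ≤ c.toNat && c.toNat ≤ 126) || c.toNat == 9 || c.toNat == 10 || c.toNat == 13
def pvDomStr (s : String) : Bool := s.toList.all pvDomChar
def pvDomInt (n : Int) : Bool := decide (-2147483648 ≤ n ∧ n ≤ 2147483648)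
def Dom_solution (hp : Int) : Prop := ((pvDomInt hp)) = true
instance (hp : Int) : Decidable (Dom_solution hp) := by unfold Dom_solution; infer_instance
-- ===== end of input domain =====

-- B replaces A's while-loop with the direct closed form hp//5 + (hp%5)//3 + (hp%5)%3 (simpler); Pre_ restricts to hp ≥ 0, where A terminates.


-- ===== PORT A =====
-- literal transliteration of A's while-loop; `fuel` is only a totality guard:
-- on every input admitted by Pre_solution the loop returns well before fuel runs out.
def solutionLoop (fuel : Nat) (hp answer : Int) : Int :=
  match fuel with
  | 0 => answer   -- unreachable under Pre_solution
  | f + 1 =>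
    if hp == 0 then answer
    else
      let (answer, hp) :=
        if PySem.Int.floordiv hp 5 ≥ 0 then
          (answer + PySem.Int.floordiv hp 5, PySem.Int.mod hp 5)
        else (answer, hp)
      let (answer, hp) :=
        if PySem.Int.floordiv hp 3 ≥ 0 then
          (answer + PySem.Int.floordiv hp 3, PySem.Int.mod hp 3)
        else (answer, hp)
      if hp ≤ 2 then
        if hp == 0 then answer
        else solutionLoop f (hp - 1) (answer + 1)
      else solutionLoop f hp answer

def solution (hp : Int) : Int := solutionLoop (hp.toNat + 3) hp 0

-- ===== PORT B =====
def solution_alt (hp : Int) : Int :=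
  PySem.Int.floordiv hp 5 + PySem.Int.floordiv (PySem.Int.mod hp 5) 3
    + PySem.Int.mod (PySem.Int.mod hp 5) 3

-- ===== PRECONDITION & SPEC =====
-- Pre_ excludes negative hp: there Python A loops forever (never returns).
def Pre_solution (hp : Int) : Prop := 0 ≤ hp
instance (hp : Int) : Decidable (Pre_solution hp) := by unfold Pre_solution; infer_instance
def pvWitness_solution : Int := (23)
def Spec_solution (hp : Int) (out : Int) : Prop := out = solution_alt hp
instance (hp : Int) (out : Int) : Decidable (Spec_solution hp out) := by unfold Spec_solution; infer_instance

-- ===== CLAIM (what is proved, stated in full; the proofs are below) =====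
def Claim_equal_solution : Prop := ∀ (hp : Int), Dom_solution hp → Pre_solution hp → Spec_solution hp (solution hp)

-- ===== LEMMAS AND PROOFS =====

theorem loop_eq (f : Nat) (hp a : Int) (h : 0 ≤ hp) :
    solutionLoop (f + 3) hp a = a + solution_alt hp := by
  rcases eq_or_lt_of_le h with h0 | hpos
  · simp [solutionLoop, solution_alt, ← h0, PySem.Int.floordiv, PySem.Int.mod]
  · have h5 : PySem.Int.floordiv hp 5 = hp / 5 :=
      PySem.Int.floordiv_eq_ediv_of_pos (by omega)
    have m5 : PySem.Int.mod hp 5 = hp % 5 :=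
      PySem.Int.mod_eq_emod_of_pos (by omega)
    have h3 : PySem.Int.floordiv (hp % 5) 3 = (hp % 5) / 3 :=
      PySem.Int.floordiv_eq_ediv_of_pos (by omega)
    have m3 : PySem.Int.mod (hp % 5) 3 = (hp % 5) % 3 :=
      PySem.Int.mod_eq_emod_of_pos (by omega)
    have hd5 : 0 ≤ hp / 5 := Int.ediv_nonneg (by omega) (by omega)
    have hm5 : 0 ≤ hp % 5 ∧ hp % 5 < 5 := ⟨Int.emod_nonneg _ (by omega), Int.emod_lt_of_pos _ (by omega)⟩
    have hd3 : 0 ≤ (hp % 5) / 3 := Int.ediv_nonneg (by omega) (by omega)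
    have hm3 : 0 ≤ (hp % 5) % 3 ∧ (hp % 5) % 3 < 3 :=
      ⟨Int.emod_nonneg _ (by omega), Int.emod_lt_of_pos _ (by omega)⟩
    have hne : ¬ (hp == 0) = true := by simp; omega
    -- unfold the first iteration
    show solutionLoop (f + 2 + 1) hp a = _
    rw [solutionLoop]
    simp only [hne, h5, m5, h3, m3, if_pos hd5, if_pos hd3, if_pos (by omega : hp % 5 % 3 ≤ 2)]
    set r := hp % 5 % 3 with hr
    have z : ∀ (g : Nat) (b : Int), solutionLoop (g + 1) 0 b = b := by
      intro g b; rw [solutionLoop]; simp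
    have o : ∀ (g : Nat) (b : Int), solutionLoop (g + 2) 1 b = b + 1 := by
      intro g b
      show solutionLoop (g + 1 + 1) 1 b = b + 1
      rw [solutionLoop]
      have e1 : PySem.Int.floordiv (1 : Int) 5 = 0 := by decide
      have e2 : PySem.Int.mod (1 : Int) 5 = 1 := by decide
      have e3 : PySem.Int.floordiv (1 : Int) 3 = 0 := by decide
      have e4 : PySem.Int.mod (1 : Int) 3 = 1 := by decide
      simp only [e1, e2]
      norm_num
      exact z g (b + 1)
    have hrc : r = 0 ∨ r = 1 ∨ r = 2 := by omega
    rcases hrc with h0 | h1 | h2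
    · simp [solution_alt, h0]
      omega
    · rw [if_neg (by simp [h1]), h1]
      norm_num
      rw [show f + 2 = f + 1 + 1 from rfl, z]
      simp [solution_alt, ← hr, h1]
      omega
    · rw [if_neg (by simp [h2]), h2]
      norm_num
      rw [o]
      simp [solution_alt, ← hr, h2]
      omega

-- ===== VERDICT (by name: the statement is the Claim_ definition above) =====
theorem solution_spec : Claim_equal_solution := by
  intro hp _ hpre
  show solution hp = solution_alt hp
  unfold solution
  rw [loop_eq _ hp 0 hpre]
  ring
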